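-- pv_equiv track=rewrite | github.com/UO299855/V2 | exercisesTesting/insertNewLine.py | linea_tiene_bloque_abierto
-- ===== SOURCE A (Python) =====
-- def linea_tiene_bloque_abierto(linea):
--     """
--     Determina si una línea deja un bloque LaTeX sin cerrar
--     contando llaves.
--     """
--     balance = 0
--
--     i = 0
--     while i < len(linea):
--         if linea[i] == '{':
--             balance += 1
--         elif linea[i] == '}':
--             balance -= 1
--         i += 1
--
--     return balance > 0
-- ===== SOURCE B (Python) =====
-- def linea_tiene_bloque_abierto(linea):
--     """
--     Determina si una línea deja un bloque LaTeX sin cerrar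
--     contando llaves.
--     """
--     return linea.count('{') > linea.count('}')
-- ===== Notes on version B (the rewrite author's own statement) =====
-- stated objective: idiomatic
-- what changed: The manual index-driven while loop maintaining a running balance with branches is replaced by two str.count scans whose results are compared strictly.
import Mathlib
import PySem

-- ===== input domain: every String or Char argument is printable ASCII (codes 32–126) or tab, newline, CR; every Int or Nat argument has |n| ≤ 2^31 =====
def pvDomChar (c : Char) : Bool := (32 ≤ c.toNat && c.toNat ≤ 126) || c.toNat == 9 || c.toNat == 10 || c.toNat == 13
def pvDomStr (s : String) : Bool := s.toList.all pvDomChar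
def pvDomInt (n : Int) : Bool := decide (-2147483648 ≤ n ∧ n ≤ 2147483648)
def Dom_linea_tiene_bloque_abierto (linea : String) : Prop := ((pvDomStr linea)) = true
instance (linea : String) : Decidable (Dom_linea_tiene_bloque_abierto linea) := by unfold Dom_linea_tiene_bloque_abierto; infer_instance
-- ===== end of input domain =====

-- B replaces A's manual balance-tracking index loop by two str.count calls compared with '>' (idiomatic).

-- ===== PORT A =====
-- the while loop over index i, visiting linea[i] in order, as structural recursion on the chars
def pvALoop : List Char → Int → Int
  | [], balance => balance
  | c :: rest, balance =>
      if c = '{' then pvALoop rest (balance + 1)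
      else if c = '}' then pvALoop rest (balance - 1)
      else pvALoop rest balance

def linea_tiene_bloque_abierto (linea : String) : Bool :=
  decide (pvALoop linea.toList 0 > 0)

-- ===== PORT B =====
def linea_tiene_bloque_abierto_alt (linea : String) : Bool :=
  decide (PySem.Str.count linea "}" < PySem.Str.count linea "{")

-- ===== PRECONDITION & SPEC =====
def Spec_linea_tiene_bloque_abierto (linea : String) (out : Bool) : Prop := out = linea_tiene_bloque_abierto_alt linea
instance (linea : String) (out : Bool) : Decidable (Spec_linea_tiene_bloque_abierto linea out) := by unfold Spec_linea_tiene_bloque_abierto; infer_instance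

-- ===== CLAIM (what is proved, stated in full; the proofs are below) =====
def Claim_equal_linea_tiene_bloque_abierto : Prop := ∀ (linea : String), Dom_linea_tiene_bloque_abierto linea → Spec_linea_tiene_bloque_abierto linea (linea_tiene_bloque_abierto linea)

-- ===== LEMMAS AND PROOFS =====

-- A's loop computes start balance + (#'{' − #'}')
theorem pvALoop_eq (l : List Char) (b : Int) :
    pvALoop l b = b + (l.count '{' : Int) - (l.count '}' : Int) := by
  induction l generalizing b with
  | nil => simp [pvALoop]
  | cons c rest ih =>
    by_cases h1 : c = '{'
    · subst h1; simp [pvALoop, ih]; ring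
    · by_cases h2 : c = '}'
      · subst h2; simp [pvALoop, h1, ih]; ring
      · simp [pvALoop, h1, h2, ih]

-- Python's str.count with a single-character needle counts that character
theorem count_go_singleton (c : Char) (l : List Char) (fuel acc : Nat)
    (h : l.length ≤ fuel) :
    PySem.Chars.count.go [c] fuel l acc = acc + l.count c := by
  induction l generalizing fuel acc with
  | nil => cases fuel <;> simp [PySem.Chars.count.go]
  | cons d rest ih =>
    cases fuel with
    | zero => simp at h
    | succ n =>
      have hn : rest.length ≤ n := by simpa using h
      by_cases hd : c = d
      · subst hd
        simp [PySem.Chars.count.go, List.isPrefixOf, ih _ _ hn]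
        omega
      · have hb : (c == d) = false := beq_eq_false_iff_ne.mpr hd
        have hb2 : (d == c) = false := beq_eq_false_iff_ne.mpr (Ne.symm hd)
        simp [PySem.Chars.count.go, List.isPrefixOf, hb, hb2, ih _ _ hn, List.count_cons]

theorem chars_count_singleton (c : Char) (l : List Char) :
    PySem.Chars.count l [c] = l.count c := by
  simp [PySem.Chars.count, count_go_singleton c l l.length 0 le_rfl]

-- ===== VERDICT (by name: the statement is the Claim_ definition above) =====
theorem linea_tiene_bloque_abierto_spec : Claim_equal_linea_tiene_bloque_abierto := by
  intro linea _
  unfold Spec_linea_tiene_bloque_abierto linea_tiene_bloque_abierto linea_tiene_bloque_abierto_alt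
  have h1 : PySem.Str.count linea "{" = linea.toList.count '{' := by
    rw [PySem.Str.count_eq]; exact chars_count_singleton '{' linea.toList
  have h2 : PySem.Str.count linea "}" = linea.toList.count '}' := by
    rw [PySem.Str.count_eq]; exact chars_count_singleton '}' linea.toList
  rw [h1, h2, pvALoop_eq]
  simp only [decide_eq_decide]
  omega
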